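-- pv_equiv track=rewrite | github.com/areddy2022/autobench | autobench/testbench_generator.py | _ensure_binary_only
-- ===== SOURCE A (Python) =====
-- def _ensure_binary_only(value: str) -> str:
--     """Ensure value contains only binary digits (0,1), convert hex if needed."""
--     clean_value = value.upper().strip()
--
--     # Check if this looks like a hex string (contains A-F)
--     if any(c in clean_value for c in 'ABCDEF'):
--         # Check if it's a valid hex string (all chars are hex digits)
--         if all(c in '0123456789ABCDEF' for c in clean_value):
--             try:
--                 # Convert entire hex string to binary
--                 hex_val = int(clean_value, 16)
--                 binary_str = bin(hex_val)[2:]  # Remove '0b' prefix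
--
--                 # Ensure we have proper bit width (multiple of 4 for hex conversion)
--                 target_bits = len(clean_value) * 4
--                 binary_str = binary_str.zfill(target_bits)
--
--                 return binary_str
--             except ValueError:
--                 # If hex conversion fails, fall back to character replacement
--                 pass
--
--         # Fallback: replace individual hex characters
--         hex_replacements = {
--             'A': '1010', 'B': '1011', 'C': '1100', 'D': '1101',
--             'E': '1110', 'F': '1111'
--         }
--
--         result = clean_value
--         for hex_char, binary_equiv in hex_replacements.items():
--             result = result.replace(hex_char, binary_equiv)
--
--         return result
--
--     # If it's already binary or numeric, return as-is
--     return clean_value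
-- ===== SOURCE B (Python) =====
-- # Simpler re-implementation: one uniform per-character table pass replaces
-- # int()/bin()/zfill() plus the six-pass .replace() loop.
--
-- _HEX_BITS = {'A': '1010', 'B': '1011', 'C': '1100', 'D': '1101',
--              'E': '1110', 'F': '1111'}
--
-- _DIGIT_BITS = {'0': '0000', '1': '0001', '2': '0010', '3': '0011',
--                '4': '0100', '5': '0101', '6': '0110', '7': '0111',
--                '8': '1000', '9': '1001', **_HEX_BITS}
--
--
-- def _ensure_binary_only(value: str) -> str:
--     clean_value = value.upper().strip()
--
--     if not any(c in 'ABCDEF' for c in clean_value):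
--         # already binary or numeric
--         return clean_value
--
--     if all(c in '0123456789ABCDEF' for c in clean_value):
--         # valid hex: every hex digit contributes exactly 4 bits, so this
--         # equals int(clean,16) rendered in binary zero-filled to 4*len
--         return ''.join(_DIGIT_BITS[c] for c in clean_value)
--
--     # mixed content: expand only the hex letters A-F
--     return ''.join(_HEX_BITS.get(c, c) for c in clean_value)
-- ===== Notes on version B (the rewrite author's own statement) =====
-- stated objective: simpler
-- what changed: Replaced the int()/bin()/zfill() numeric round-trip and the six sequential .replace() passes by one uniform per-character table lookup joined in a single pass (each hex digit contributes exactly 4 bits, so the join equals the zero-filled binary of int(clean,16)).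
import Mathlib
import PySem

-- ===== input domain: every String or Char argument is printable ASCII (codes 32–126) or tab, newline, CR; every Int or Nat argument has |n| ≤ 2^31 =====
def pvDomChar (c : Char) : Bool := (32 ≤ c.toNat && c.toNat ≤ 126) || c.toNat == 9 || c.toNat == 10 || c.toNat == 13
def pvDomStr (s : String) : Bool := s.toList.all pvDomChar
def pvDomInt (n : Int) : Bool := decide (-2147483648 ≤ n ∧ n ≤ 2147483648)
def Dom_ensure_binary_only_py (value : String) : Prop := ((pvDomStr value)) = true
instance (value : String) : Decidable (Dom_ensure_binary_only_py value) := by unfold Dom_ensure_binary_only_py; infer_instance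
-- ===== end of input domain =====

-- B replaces A's int()/bin()/zfill() round-trip and six-pass replace() loop by one
-- per-character table lookup joined in a single pass (objective: simpler; return value only).

-- ===== PORT A =====
def pvHexDigits : List Char := ['0','1','2','3','4','5','6','7','8','9','A','B','C','D','E','F']
def pvLetters : List Char := ['A','B','C','D','E','F']

def pvHexVal (c : Char) : Nat := if c.toNat ≤ 57 then c.toNat - 48 else c.toNat - 55

def pvHexFold (cs : List Char) : Nat := cs.foldl (fun a c => 16 * a + pvHexVal c) 0

-- hand port of Python's int(s, 16): exact on non-empty strings of uppercase hex digits,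
-- which is exactly what A feeds it (the `all(c in '0123456789ABCDEF')` guard holds at the
-- call site, so int(clean_value, 16) never raises there); none = ValueError otherwise.
def pvIntOfHex? (cs : List Char) : Option Int :=
  if !cs.isEmpty && cs.all (fun c => PySem.Chars.isIn [c] pvHexDigits) then
    some (↑(pvHexFold cs))
  else none

-- hex_replacements dict, in insertion order
def pvRepl : List (Char × List Char) :=
  [('A',['1','0','1','0']),('B',['1','0','1','1']),('C',['1','1','0','0']),
   ('D',['1','1','0','1']),('E',['1','1','1','0']),('F',['1','1','1','1'])]

def ensure_binary_only_py (value : String) : String :=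
  let clean_value := PySem.Chars.strip (PySem.Chars.upper value.toList)
  -- any(c in clean_value for c in 'ABCDEF')
  if pvLetters.any (fun c => PySem.Chars.isIn [c] clean_value) then
    -- fallback: the character-replacement loop after the inner if / except
    let fallback : List Char → String := fun cv =>
      String.ofList (pvRepl.foldl (fun result p => PySem.Chars.replace result [p.1] p.2) cv)
    -- all(c in '0123456789ABCDEF' for c in clean_value)
    if clean_value.all (fun c => PySem.Chars.isIn [c] pvHexDigits) then
      match pvIntOfHex? clean_value with
      | some hex_val =>
        let binary_str := PySem.Chars.slice (PySem.Int.toBinChars0b hex_val) (some 2) none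
        let target_bits : Int := (clean_value.length : Int) * 4
        String.ofList (PySem.Chars.zfill binary_str target_bits)
      | none => fallback clean_value   -- except ValueError: pass
    else fallback clean_value
  else String.ofList clean_value

-- ===== PORT B =====
-- digit_bits table ('_DIGIT_BITS'); [] is the (unreachable under the guard) KeyError
def pvDigitBits (c : Char) : List Char :=
  match c with
  | '0' => ['0','0','0','0'] | '1' => ['0','0','0','1'] | '2' => ['0','0','1','0']
  | '3' => ['0','0','1','1'] | '4' => ['0','1','0','0'] | '5' => ['0','1','0','1']
  | '6' => ['0','1','1','0'] | '7' => ['0','1','1','1'] | '8' => ['1','0','0','0']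
  | '9' => ['1','0','0','1'] | 'A' => ['1','0','1','0'] | 'B' => ['1','0','1','1']
  | 'C' => ['1','1','0','0'] | 'D' => ['1','1','0','1'] | 'E' => ['1','1','1','0']
  | 'F' => ['1','1','1','1'] | _ => []

-- _HEX_BITS table; none = key absent (then .get falls back to the character itself)
def pvHexBits? (c : Char) : Option (List Char) :=
  match c with
  | 'A' => some ['1','0','1','0'] | 'B' => some ['1','0','1','1']
  | 'C' => some ['1','1','0','0'] | 'D' => some ['1','1','0','1']
  | 'E' => some ['1','1','1','0'] | 'F' => some ['1','1','1','1'] | _ => none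

def ensure_binary_only_py_alt (value : String) : String :=
  let clean_value := PySem.Chars.strip (PySem.Chars.upper value.toList)
  -- not any(c in 'ABCDEF' for c in clean_value)
  if !(clean_value.any (fun c => PySem.Chars.isIn [c] pvLetters)) then
    String.ofList clean_value
  else if clean_value.all (fun c => PySem.Chars.isIn [c] pvHexDigits) then
    -- ''.join(_DIGIT_BITS[c] for c in clean_value)
    String.ofList (clean_value.flatMap pvDigitBits)
  else
    -- ''.join(_HEX_BITS.get(c, c) for c in clean_value)
    String.ofList (clean_value.flatMap (fun c => (pvHexBits? c).getD [c]))

-- ===== PRECONDITION & SPEC =====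
def Spec_ensure_binary_only_py (value : String) (out : String) : Prop := out = ensure_binary_only_py_alt value
instance (value : String) (out : String) : Decidable (Spec_ensure_binary_only_py value out) := by unfold Spec_ensure_binary_only_py; infer_instance

-- ===== CLAIM (what is proved, stated in full; the proofs are below) =====
def Claim_equal_ensure_binary_only_py : Prop := ∀ (value : String), Dom_ensure_binary_only_py value → Spec_ensure_binary_only_py value (ensure_binary_only_py value)

-- ===== LEMMAS AND PROOFS =====



theorem tdc_eq (fuel n : Nat) (ds : List Char) (h : n < fuel) :
    Nat.toDigitsCore 2 fuel n ds = Nat.toDigits 2 n ++ ds := by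
  induction n using Nat.strong_induction_on generalizing fuel ds with
  | _ n ih =>
    match fuel, h with
    | fuel+1, h =>
      rw [Nat.toDigitsCore]
      by_cases h2 : n / 2 = 0
      · simp only [h2]
        rw [Nat.toDigits, Nat.toDigitsCore]
        simp [h2]
      · simp only [if_neg h2]
        rw [ih (n/2) (by omega) fuel _ (by omega)]
        conv_rhs => rw [Nat.toDigits, Nat.toDigitsCore]
        simp only [if_neg h2]
        rw [ih (n/2) (by omega) n _ (by omega)]
        simp

theorem toDigits_two_rec (n : Nat) (h : 2 ≤ n) :
    Nat.toDigits 2 n = Nat.toDigits 2 (n/2) ++ [(n % 2).digitChar] := by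
  rw [Nat.toDigits, Nat.toDigitsCore]
  have h2 : ¬ n / 2 = 0 := by omega
  simp only [if_neg h2]
  rw [tdc_eq n (n/2) _ (by omega)]


def pvBitChar (n i : Nat) : Char := if n.testBit i then '1' else '0'
def pvPadBits (n w : Nat) : List Char := ((List.range w).reverse).map (pvBitChar n)

theorem padBits_succ (n k : Nat) :
    pvPadBits n (k+1) = pvPadBits (n/2) k ++ [pvBitChar n 0] := by
  unfold pvPadBits
  rw [show k + 1 = 1 + k by omega, List.range_add]
  simp only [List.reverse_append, List.map_append, List.map_reverse, List.map_map]
  simp [Function.comp_def, pvBitChar]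
  intro a _
  rw [Nat.add_comm, Nat.testBit_add_one]

theorem size_div_two (n : Nat) (h : 2 ≤ n) : n.size = (n/2).size + 1 := by
  have h1 : 1 ≤ n/2 := by omega
  set s := (n/2).size with hs
  have hs1 : 1 ≤ s := by
    have : (0:Nat) < (n/2).size := Nat.lt_size.mpr (by simp only [pow_zero]; exact h1)
    omega
  have hlo : 2^(s-1) ≤ n/2 := Nat.lt_size.mp (by omega : s - 1 < (n/2).size)
  have hhi : n/2 < 2^s := Nat.size_le.mp (le_refl _)
  have hlo' : 2^s ≤ n := by
    have h3 : 2^(s-1) * 2 ≤ (n/2) * 2 := Nat.mul_le_mul_right 2 hlo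
    have h2 : 2^(s-1) * 2 = 2^s := by
      rw [← pow_succ]; congr 1; omega
    omega
  have hhi' : n < 2^(s+1) := by
    have h3 : (n/2+1) * 2 ≤ 2^s * 2 := Nat.mul_le_mul_right 2 hhi
    rw [pow_succ]; omega
  have a := Nat.size_le.mpr hhi'
  have b := Nat.lt_size.mpr hlo'
  omega

theorem toDigits_eq_padBits (n : Nat) :
    Nat.toDigits 2 n = pvPadBits n (max 1 n.size) := by
  induction n using Nat.strong_induction_on with
  | _ n ih =>
    match n with
    | 0 => decide
    | 1 => decide
    | (m+2) =>
      rw [toDigits_two_rec (m+2) (by omega)]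
      rw [ih ((m+2)/2) (by omega)]
      have hsz := size_div_two (m+2) (by omega)
      have h1 : 1 ≤ (m+2)/2 := by omega
      have hs1 : 1 ≤ ((m+2)/2).size := by
        have : (0:Nat) < ((m+2)/2).size := Nat.lt_size.mpr (by simp only [pow_zero]; exact h1)
        omega
      have : max 1 (m+2).size = ((m+2)/2).size + 1 := by omega
      rw [this, padBits_succ]
      have : max 1 ((m+2)/2).size = ((m+2)/2).size := by omega
      rw [this]
      congr 1
      simp only [pvBitChar, Nat.testBit_zero]
      have : (m+2) % 2 = 0 ∨ (m+2) % 2 = 1 := by omega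
      rcases this with h | h <;> rw [h] <;> decide

theorem padBits_split (m d w : Nat) (hd : d < 16) :
    pvPadBits (16*m + d) (w+4) = pvPadBits m w ++ pvPadBits d 4 := by
  unfold pvPadBits
  rw [show w + 4 = 4 + w by omega, List.range_add]
  simp only [List.reverse_append, List.map_append, List.map_reverse, List.map_map]
  congr 1
  · congr 1
    apply List.map_congr_left
    intro a _
    simp only [Function.comp_def, pvBitChar]
    have : (16*m + d).testBit (4+a) = m.testBit a := by
      rw [show 16*m + d = 2^4 * m + d by ring_nf]
      rw [Nat.testBit_two_pow_mul_add m (by omega) (4+a)]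
      simp [show ¬ (4+a < 4) by omega, show 4+a-4 = a by omega]
    rw [this]
  · congr 1
    apply List.map_congr_left
    intro a ha
    simp only [List.mem_range] at ha
    simp only [pvBitChar]
    have : (16*m + d).testBit a = d.testBit a := by
      rw [show 16*m + d = 2^4 * m + d by ring_nf]
      rw [Nat.testBit_two_pow_mul_add m (by omega) a]
      simp [show a < 4 by omega]
    rw [this]

theorem padBits_ext (n v w : Nat) (hn : n.size ≤ v) (hvw : v ≤ w) :
    pvPadBits n w = List.replicate (w - v) '0' ++ pvPadBits n v := by
  unfold pvPadBits
  rw [show w = v + (w - v) by omega, List.range_add]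
  simp only [List.reverse_append, List.map_append, List.map_reverse, List.map_map]
  rw [show v + (w-v) - v = w - v by omega]
  congr 1
  rw [List.eq_replicate_iff]
  constructor
  · simp
  · intro b hb
    simp only [List.mem_reverse, List.mem_map, List.mem_range] at hb
    obtain ⟨a, _, rfl⟩ := hb
    simp only [Function.comp_def, pvBitChar]
    have : n.testBit (v + a) = false := by
      apply Nat.testBit_eq_false_of_lt
      calc n < 2^v := Nat.size_le.mp hn
      _ ≤ 2^(v+a) := Nat.pow_le_pow_right (by omega) (by omega)
    simp [this]

theorem padBits_head (n k : Nat) :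
    pvPadBits n (k+1) = pvBitChar n k :: (List.map (pvBitChar n) (List.range k).reverse) := by
  unfold pvPadBits
  rw [List.range_succ]
  simp

theorem zfill_binary (n w : Nat) (h1 : 1 ≤ w) (h2 : n < 2^w) :
    PySem.Chars.zfill (Nat.toDigits 2 n) (w:Int) = pvPadBits n w := by
  rw [toDigits_eq_padBits]
  have hv : max 1 n.size ≤ w := by
    have := Nat.size_le.mpr h2
    omega
  rw [padBits_ext n (max 1 n.size) w (by omega) hv]
  obtain ⟨k, hk⟩ : ∃ k, max 1 n.size = k + 1 := ⟨max 1 n.size - 1, by omega⟩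
  rw [hk, padBits_head]
  rw [PySem.Chars.zfill]
  have hlen : (pvBitChar n k :: List.map (pvBitChar n) (List.range k).reverse).length = k + 1 := by
    simp
  by_cases hw : (w:Int) ≤ (pvBitChar n k :: List.map (pvBitChar n) (List.range k).reverse).length
  · rw [if_pos hw]
    have : w = k + 1 := by rw [hlen] at hw; omega
    subst this
    simp
  · rw [if_neg hw]
    have hsign : ¬ (pvBitChar n k = '+' ∨ pvBitChar n k = '-') := by
      unfold pvBitChar
      rcases Bool.eq_false_or_eq_true (n.testBit k) with h | h <;> simp [h]
    rw [if_neg hsign]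
    rw [hlen] at hw ⊢
    simp only [Int.toNat_natCast]


theorem rep_go (h : Char) (new : List Char) (cs : List Char) (fuel : Nat) (acc : List Char)
    (hf : cs.length ≤ fuel) :
    PySem.Chars.replace.go [h] new fuel cs acc
      = acc.reverse ++ cs.flatMap (fun c => if c = h then new else [c]) := by
  induction cs generalizing fuel acc with
  | nil =>
    match fuel with
    | 0 => rw [PySem.Chars.replace.go]; simp
    | fuel+1 => rw [PySem.Chars.replace.go.eq_2] <;> simp
  | cons c t ih =>
    match fuel, hf with
    | fuel+1, hf =>
      rw [PySem.Chars.replace.go.eq_3]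
      by_cases hc : c = h
      · subst hc
        have hp : List.isPrefixOf [c] (c :: t) = true := by simp [List.isPrefixOf]
        rw [if_pos hp]
        simp only [List.length_nil, List.length_cons, List.drop_succ_cons, List.drop]
        rw [ih fuel _ (by simpa using hf)]
        simp
      · have hp : List.isPrefixOf [h] (c :: t) = false := by
          simp [List.isPrefixOf]; exact fun e => (hc e.symm).elim
        rw [hp]
        simp only [Bool.false_eq_true, if_false]
        rw [ih fuel _ (by simpa using hf)]
        simp [hc]

theorem rep_single (h : Char) (new : List Char) (cs : List Char) :
    PySem.Chars.replace cs [h] new = cs.flatMap (fun c => if c = h then new else [c]) := by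
  rw [PySem.Chars.replace]
  simp [rep_go h new cs cs.length [] (le_refl _)]


theorem isIn_single (c : Char) (s : List Char) : PySem.Chars.isIn [c] s = true ↔ c ∈ s := by
  rw [PySem.Chars.isIn_iff_infix, List.singleton_infix_iff]

-- the two 'any' guards scan opposite lists but test the same thing
theorem any_letters_comm (cs : List Char) :
    pvLetters.any (fun c => PySem.Chars.isIn [c] cs)
      = cs.any (fun c => PySem.Chars.isIn [c] pvLetters) := by
  rw [Bool.eq_iff_iff]
  simp only [List.any_eq_true, isIn_single]
  constructor <;> rintro ⟨c, h1, h2⟩ <;> exact ⟨c, h2, h1⟩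

-- each hex digit is worth < 16 and its 4-bit table row is its padded binary form
theorem hexdigit_facts (c : Char) (hc : c ∈ pvHexDigits) :
    pvHexVal c < 16 ∧ pvDigitBits c = pvPadBits (pvHexVal c) 4 := by
  simp only [pvHexDigits, List.mem_cons, List.not_mem_nil, or_false] at hc
  rcases hc with rfl|rfl|rfl|rfl|rfl|rfl|rfl|rfl|rfl|rfl|rfl|rfl|rfl|rfl|rfl|rfl <;>
    exact ⟨by decide, by decide⟩

-- the whole valid-hex join equals the padded bits of the folded value, which is < 16^len
theorem flat_digits (cs : List Char) (h : ∀ c ∈ cs, c ∈ pvHexDigits) :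
    cs.flatMap pvDigitBits = pvPadBits (pvHexFold cs) (4 * cs.length)
      ∧ pvHexFold cs < 16 ^ cs.length := by
  induction cs using List.reverseRecOn with
  | nil => exact ⟨by decide, by decide⟩
  | append_singleton cs d ih =>
    have h' : ∀ c ∈ cs, c ∈ pvHexDigits := fun c hc => h c (by simp [hc])
    obtain ⟨ih1, ih2⟩ := ih h'
    obtain ⟨hd16, hdbits⟩ := hexdigit_facts d (h d (by simp))
    have hfold : pvHexFold (cs ++ [d]) = 16 * pvHexFold cs + pvHexVal d := by
      unfold pvHexFold
      rw [List.foldl_append]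
      rfl
    constructor
    · rw [List.flatMap_append, ih1, hfold]
      simp only [List.flatMap_cons, List.flatMap_nil, List.append_nil, hdbits]
      rw [show 4 * (cs ++ [d]).length = 4 * cs.length + 4 by simp; omega]
      rw [padBits_split _ _ _ hd16]
    · rw [hfold]
      have : 16 * pvHexFold cs + pvHexVal d < 16 * (pvHexFold cs + 1) := by omega
      calc 16 * pvHexFold cs + pvHexVal d < 16 * (pvHexFold cs + 1) := this
        _ ≤ 16 * 16 ^ cs.length := by omega
        _ = 16 ^ (cs ++ [d]).length := by rw [List.length_append]; simp [pow_succ, Nat.mul_comm]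

-- the six sequential replace() passes equal B's single expansion pass
theorem fallback_eq (cs : List Char) :
    pvRepl.foldl (fun result p => PySem.Chars.replace result [p.1] p.2) cs
      = cs.flatMap (fun c => (pvHexBits? c).getD [c]) := by
  simp only [pvRepl, List.foldl_cons, List.foldl_nil]
  rw [rep_single, rep_single, rep_single, rep_single, rep_single, rep_single]
  rw [List.flatMap_assoc, List.flatMap_assoc, List.flatMap_assoc, List.flatMap_assoc,
      List.flatMap_assoc]
  congr 1
  funext c
  by_cases hA : c = 'A'; · subst hA; decide
  by_cases hB : c = 'B'; · subst hB; decide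
  by_cases hC : c = 'C'; · subst hC; decide
  by_cases hD : c = 'D'; · subst hD; decide
  by_cases hE : c = 'E'; · subst hE; decide
  by_cases hF : c = 'F'; · subst hF; decide
  have hbits : pvHexBits? c = none := by
    unfold pvHexBits?
    split
    all_goals first | rfl | (exfalso; simp_all)
  simp [hA, hB, hC, hD, hE, hF, hbits]

-- ===== VERDICT (by name: the statement is the Claim_ definition above) =====
theorem ensure_binary_only_py_spec : Claim_equal_ensure_binary_only_py := by
  intro value _
  unfold Spec_ensure_binary_only_py ensure_binary_only_py ensure_binary_only_py_alt
  dsimp only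
  set cs := PySem.Chars.strip (PySem.Chars.upper value.toList) with hcs
  rw [any_letters_comm]
  by_cases hany : (cs.any fun c => PySem.Chars.isIn [c] pvLetters) = true
  swap
  · -- no A-F letter: both return clean_value as-is
    rw [Bool.not_eq_true] at hany
    simp only [hany, Bool.false_eq_true, if_false, Bool.not_false, if_true]
  simp only [hany, if_true, Bool.not_true, Bool.false_eq_true, if_false]
  by_cases hall : (cs.all fun c => PySem.Chars.isIn [c] pvHexDigits) = true
  swap
  · -- mixed content: the six replace() passes equal the single expansion pass
    rw [Bool.not_eq_true] at hall
    simp only [hall, Bool.false_eq_true, if_false]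
    rw [fallback_eq]
  simp only [hall, if_true]
  -- the valid-hex branch
  have hne : cs ≠ [] := by
    rw [List.any_eq_true] at hany
    obtain ⟨c, hc, _⟩ := hany
    exact fun e => by simp [e] at hc
  have hhex : ∀ c ∈ cs, c ∈ pvHexDigits := by
    intro c hc
    rw [List.all_eq_true] at hall
    exact (isIn_single c pvHexDigits).mp (hall c hc)
  have hsome : pvIntOfHex? cs = some (↑(pvHexFold cs)) := by
    unfold pvIntOfHex?
    rw [if_pos]
    simp [hall, hne]
  rw [hsome]
  dsimp only
  obtain ⟨hflat, hlt⟩ := flat_digits cs hhex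
  rw [hflat]
  -- bin(n)[2:]  =  toDigits 2 n
  have htb : PySem.Int.toBinChars0b (↑(pvHexFold cs)) = '0' :: 'b' :: Nat.toDigits 2 (pvHexFold cs) := by
    unfold PySem.Int.toBinChars0b
    rw [if_neg (by omega)]
    simp
  rw [htb]
  have hslice : PySem.Chars.slice ('0' :: 'b' :: Nat.toDigits 2 (pvHexFold cs)) (some 2) none
      = Nat.toDigits 2 (pvHexFold cs) := by
    simp [pysem]
  rw [hslice]
  have hw : (cs.length : Int) * 4 = ((4 * cs.length : Nat) : Int) := by push_cast; ring
  rw [hw]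
  have hlen1 : 1 ≤ cs.length := by
    have := List.length_pos_iff.mpr hne
    omega
  have hbound : pvHexFold cs < 2 ^ (4 * cs.length) := by
    calc pvHexFold cs < 16 ^ cs.length := hlt
      _ = 2 ^ (4 * cs.length) := by rw [show (16:Nat) = 2^4 by norm_num, ← pow_mul]
  rw [zfill_binary _ _ (by omega) hbound]
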